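-- pv_equiv track=rewrite | github.com/sky9154/DiscordBot | Package/Coupons.py | check
-- ===== SOURCE A (Python) =====
-- def check(id):
--   coupons = [{
--     "name" : "國旅券",
--     "week1" : ["21", "32", "98", "67", "97", "410"],
--     "week2" : ["04", "29", "40", "71", "87"]
--
--   }, {
--     "name" : "i原券",
--     "week1" : ["64", "85"],
--     "week2" : ["12", "59"]
--   }, {
--     "name" : "農遊券",
--     "week1": ["89", "32", "54", "597", "453", "152"],
--     "week2" : ["50", "13"]
--   }, {
--     "name" : "藝fun券(數位)",
--     "week1" : ["96", "15", "07", "30", "73", "98", "19", "11"],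
--     "week2" : []
--   }, {
--     "name" : "藝fun券(紙本)",
--     "week1" : ["39", "37", "23", "36", "79", "08", "14", "75"],
--     "week2" : []
--   }, {
--     "name" : "動滋券",
--     "week1" : ["97", "13", "19", "55", "71", "93", "381", "734", "644", "453", "985"],
--     "week2" : []
--   }, {
--     "name" : "客庄劵2.0",
--     "week1" : ["81", "900"],
--     "week2" : []
--   }, {
--     "name" : "地方創生券",
--     "week1" : ["081", "105", "594", "188", "089", "396", "521", "467", "912", "798", "358", "441", "367", "941", "335"],
--     "week2" : []
--   }]
--   id_list = list(id) # 將身分證轉串列，方便判斷後三後二碼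
--   flag = 0 # 旗標 判斷是否中獎
--   msg = "" # 輸出字串
--   weekKey = "week" # 各個波次的名稱
--
--   if len(id) != 3: # 判斷是否三碼
--     return("請輸入身分證後三碼")
--
--   msg = "身分證後三碼：" + str(id) + "\n"
--
--   for week in range(1, 3):
--     msg += "第 {} 波：\n".format(week)
--     weekKey += str(week)
--     for i in range(len(coupons)):
--       if(id_list[1] + id_list[2]) in coupons[i][weekKey]:
--         msg += coupons[i]["name"] + "\n"
--         flag = 1
--       else:
--         if id in coupons[i][weekKey]:
--           msg += coupons[i]["name"] + "\n"
--           flag = 1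
--     if flag == 0:
--       msg += "你什麼也沒中\n"
--
--     # 重置變數
--     flag = 0
--     weekKey = "week"
--   return msg
-- ===== SOURCE B (Python) =====
-- _NAMES = ["國旅券", "i原券", "農遊券", "藝fun券(數位)", "藝fun券(紙本)",
--           "動滋券", "客庄劵2.0", "地方創生券"]
-- _WEEK1 = [["21", "32", "98", "67", "97", "410"],
--           ["64", "85"],
--           ["89", "32", "54", "597", "453", "152"],
--           ["96", "15", "07", "30", "73", "98", "19", "11"],
--           ["39", "37", "23", "36", "79", "08", "14", "75"],
--           ["97", "13", "19", "55", "71", "93", "381", "734", "644", "453", "985"],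
--           ["81", "900"],
--           ["081", "105", "594", "188", "089", "396", "521", "467", "912", "798",
--            "358", "441", "367", "941", "335"]]
-- _WEEK2 = [["04", "29", "40", "71", "87"],
--           ["12", "59"],
--           ["50", "13"],
--           [], [], [], [], []]
--
-- def _invert(tables):
--     # inverted index: code string -> list of coupon indices whose table contains it
--     pairs = [(code, i) for i, codes in enumerate(tables) for code in codes]
--     idx = {}
--     for code, i in pairs:
--         idx.setdefault(code, []).append(i)
--     return idx
--
-- _IDX = ((1, _invert(_WEEK1)), (2, _invert(_WEEK2)))
--
-- def check(id):
--     if len(id) != 3: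
--         return "請輸入身分證後三碼"
--     msg = "身分證後三碼：" + id + "\n"
--     for week, idx in _IDX:
--         hits = sorted(set(idx.get(id[1:], []) + idx.get(id, [])))
--         msg += "第 {} 波：\n".format(week)
--         if hits:
--             for i in hits:
--                 msg += _NAMES[i] + "\n"
--         else:
--             msg += "你什麼也沒中\n"
--     return msg
-- ===== Notes on version B (the rewrite author's own statement) =====
-- stated objective: alternative
-- what changed: B precomputes, once per week, an inverted index mapping each code string to the list of coupon indices containing it; per query it does two dict lookups ({id[1:], id}), merges the index sets with set+sorted, and prints names by index, instead of A's per-coupon scan with a flag accumulator, weekKey string dispatch and if/elif membership tests.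
import Mathlib
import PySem

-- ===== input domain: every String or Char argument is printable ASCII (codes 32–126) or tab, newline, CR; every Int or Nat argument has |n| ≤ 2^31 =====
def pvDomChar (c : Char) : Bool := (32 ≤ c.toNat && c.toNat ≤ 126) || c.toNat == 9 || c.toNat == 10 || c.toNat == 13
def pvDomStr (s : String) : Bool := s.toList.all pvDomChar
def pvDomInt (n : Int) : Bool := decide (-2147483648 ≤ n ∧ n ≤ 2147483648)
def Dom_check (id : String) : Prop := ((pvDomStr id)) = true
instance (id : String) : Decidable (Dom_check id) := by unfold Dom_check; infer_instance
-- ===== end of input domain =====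

-- B replaces A's per-coupon scan (flag accumulator, weekKey string dispatch, if/elif membership
-- tests) by a precomputed inverted index per week (code -> coupon indices): two dict lookups,
-- a set union, sorted, and names printed by index.

-- ===== PORT A =====
-- A's list of coupon dicts; each dict has the fixed keys "name"/"week1"/"week2", ported as a tuple.
def couponsA : List (String × List String × List String) := [
  ("國旅券", (["21", "32", "98", "67", "97", "410"], ["04", "29", "40", "71", "87"])),
  ("i原券", (["64", "85"], ["12", "59"])),
  ("農遊券", (["89", "32", "54", "597", "453", "152"], ["50", "13"])),
  ("藝fun券(數位)", (["96", "15", "07", "30", "73", "98", "19", "11"], [])),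
  ("藝fun券(紙本)", (["39", "37", "23", "36", "79", "08", "14", "75"], [])),
  ("動滋券", (["97", "13", "19", "55", "71", "93", "381", "734", "644", "453", "985"], [])),
  ("客庄劵2.0", (["81", "900"], [])),
  ("地方創生券", (["081", "105", "594", "188", "089", "396", "521", "467", "912", "798",
                   "358", "441", "367", "941", "335"], []))]

-- coupons[i][weekKey]: weekKey is always "week1" or "week2" when looked up, so the string-keyed
-- dict access is ported exactly as an equality test on the key.
def getWeekA (c : String × List String × List String) (k : String) : List String :=
  if k == "week1" then c.2.1 else c.2.2

def check (id : String) : String :=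
  let id_list := id.toList        -- id_list = list(id)
  let flag : Int := 0
  let weekKey := "week"
  if PySem.Str.len id ≠ 3 then "請輸入身分證後三碼"
  else
    let msg := "身分證後三碼：" ++ id ++ "\n"
    -- for week in range(1, 3): state = (msg, flag, weekKey)
    let st := (PySem.List.pyRange 1 3 1).foldl (fun (st : String × Int × String) week =>
      let msg := st.1 ++ "第 " ++ PySem.Int.toStr week ++ " 波：\n"   -- "第 {} 波：\n".format(week)
      let weekKey := st.2.2 ++ PySem.Int.toStr week
      -- for i in range(len(coupons)): state = (msg, flag)
      let inner := (PySem.List.pyRange 0 (PySem.List.len couponsA) 1).foldl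
        (fun (p : String × Int) i =>
          let cpn := PySem.List.pyGetD couponsA i ("", ([], []))   -- i is always in range
          -- id_list[1] + id_list[2] (both in range: len(id) = 3 here); char+char concatenation
          if (getWeekA cpn weekKey).contains
               (String.ofList [PySem.List.pyGetD id_list 1 ' ', PySem.List.pyGetD id_list 2 ' ']) then
            (p.1 ++ cpn.1 ++ "\n", 1)
          else if (getWeekA cpn weekKey).contains id then
            (p.1 ++ cpn.1 ++ "\n", 1)
          else p) (msg, st.2.1)
      let msg := if inner.2 == 0 then inner.1 ++ "你什麼也沒中\n" else inner.1
      (msg, 0, "week")) (msg, flag, weekKey)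
    st.1

-- ===== PORT B =====
def namesB : List String :=
  ["國旅券", "i原券", "農遊券", "藝fun券(數位)", "藝fun券(紙本)", "動滋券", "客庄劵2.0", "地方創生券"]

def week1B : List (List String) := [
  ["21", "32", "98", "67", "97", "410"],
  ["64", "85"],
  ["89", "32", "54", "597", "453", "152"],
  ["96", "15", "07", "30", "73", "98", "19", "11"],
  ["39", "37", "23", "36", "79", "08", "14", "75"],
  ["97", "13", "19", "55", "71", "93", "381", "734", "644", "453", "985"],
  ["81", "900"],
  ["081", "105", "594", "188", "089", "396", "521", "467", "912", "798",
   "358", "441", "367", "941", "335"]]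

def week2B : List (List String) :=
  [["04", "29", "40", "71", "87"], ["12", "59"], ["50", "13"], [], [], [], [], []]

-- _invert(tables): pairs = [(code, i) for i, codes in enumerate(tables) for code in codes];
-- then idx.setdefault(code, []).append(i) = Dict.modify code [] (· ++ [i])
def invertB (tables : List (List String)) : PySem.Dict String (List Int) :=
  ((PySem.List.enumerate tables 0).flatMap (fun p => p.2.map (fun code => (code, p.1)))).foldl
    (fun d q => d.modify q.1 [] (· ++ [q.2])) PySem.Dict.empty

-- _IDX = ((1, _invert(_WEEK1)), (2, _invert(_WEEK2)))
def idxB : List (Int × PySem.Dict String (List Int)) :=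
  [(1, invertB week1B), (2, invertB week2B)]

def check_alt (id : String) : String :=
  if PySem.Str.len id ≠ 3 then "請輸入身分證後三碼"
  else
    idxB.foldl (fun msg wi =>
      -- hits = sorted(set(idx.get(id[1:], []) + idx.get(id, [])))
      let hits := PySem.List.sorted
        (PySem.Set.ofList ((wi.2.getD (PySem.Str.slice id (some 1) none) []) ++ (wi.2.getD id [])))
        (fun x => x) false
      let msg := msg ++ "第 " ++ PySem.Int.toStr wi.1 ++ " 波：\n"
      if hits.isEmpty then msg ++ "你什麼也沒中\n"
      else hits.foldl (fun m i => m ++ PySem.List.pyGetD namesB i "" ++ "\n") msg)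
      ("身分證後三碼：" ++ id ++ "\n")

-- ===== PRECONDITION & SPEC =====
def Spec_check (id : String) (out : String) : Prop := out = check_alt id
instance (id : String) (out : String) : Decidable (Spec_check id out) := by unfold Spec_check; infer_instance

-- ===== CLAIM (what is proved, stated in full; the proofs are below) =====
def Claim_equal_check : Prop := ∀ (id : String), Dom_check id → Spec_check id (check id)

-- ===== LEMMAS AND PROOFS =====

lemma str_toList_inj {s t : String} (h : s.toList = t.toList) : s = t := by
  have := congrArg String.ofList h; simpa using this

lemma join_empty : PySem.Str.join "" ([] : List String) = "" := by
  apply str_toList_inj; simp [PySem.Chars.join, List.intercalate]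

lemma intercalate_nil_left (l : List (List Char)) : List.intercalate [] l = l.flatten := by
  induction l with
  | nil => simp [List.intercalate]
  | cons a t ih =>
    cases t with
    | nil => simp [List.intercalate]
    | cons b u => simp_all [List.intercalate, List.intersperse]

lemma join_cons (s : String) (l : List String) :
    PySem.Str.join "" (s :: l) = s ++ PySem.Str.join "" l := by
  apply str_toList_inj
  simp [PySem.Chars.join, intercalate_nil_left]

-- A's inner loop over one week's lists, characterised: the message grows by the joined winner
-- names, and the flag records whether anything matched.
lemma weekA_eq {γ : Type} (w : γ → List String) (name : γ → String) (s t : String) :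
    ∀ (L : List γ) (msg : String) (flag : Int),
    L.foldl (fun (p : String × Int) c =>
        if (w c).contains s then (p.1 ++ name c ++ "\n", 1)
        else if (w c).contains t then (p.1 ++ name c ++ "\n", 1) else p) (msg, flag)
    = (msg ++ PySem.Str.join ""
         ((L.filter (fun c => (w c).contains s || (w c).contains t)).map (fun c => name c ++ "\n")),
       if L.any (fun c => (w c).contains s || (w c).contains t) then 1 else flag) := by
  intro L
  induction L with
  | nil => intro msg flag; simp [join_empty]
  | cons a L ih =>
    intro msg flag
    rw [List.foldl_cons, List.filter_cons, List.any_cons]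
    rcases hs : (w a).contains s with _ | _
    · rcases ht : (w a).contains t with _ | _
      · rw [if_neg Bool.false_ne_true, if_neg Bool.false_ne_true, if_neg (by simp), ih]
        simp
      · rw [if_neg Bool.false_ne_true, if_pos rfl, if_pos (by simp), ih]
        simp [join_cons, String.append_assoc]
    · rw [if_pos rfl, if_pos (by simp), ih]
      simp [join_cons, String.append_assoc]

lemma getWeekA_w1 (c : String × List String × List String) : getWeekA c "week1" = c.2.1 := by
  unfold getWeekA; rw [if_pos (by decide)]

lemma getWeekA_w2 (c : String × List String × List String) : getWeekA c "week2" = c.2.2 := by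
  unfold getWeekA; rw [if_neg (by decide)]

lemma hlen_three (id : String) (h3 : PySem.Str.len id = 3) : id.toList.length = 3 := by
  rw [PySem.Str.len_eq] at h3
  have : id.length = 3 := by exact_mod_cast h3
  simpa [String.length_toList] using this

-- B's inverted index characterised by membership: i is indexed under code c iff c is in table i.
lemma mem_invertB_getD (tables : List (List String)) (c : String) (x : Int) :
    x ∈ (invertB tables).getD c [] ↔ ∃ p ∈ PySem.List.enumerate tables 0, c ∈ p.2 ∧ x = p.1 := by
  unfold invertB
  rw [PySem.Dict.getD_foldl_modify_append]
  simp only [PySem.Dict.getD_empty, List.nil_append, List.mem_map, List.mem_filter,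
    List.mem_flatMap]
  constructor
  · rintro ⟨q, ⟨⟨p, hp, ⟨code, hcode, rfl⟩⟩, hq⟩, rfl⟩
    exact ⟨p, hp, by simpa using (eq_of_beq hq) ▸ hcode, rfl⟩
  · rintro ⟨p, hp, hc, rfl⟩
    exact ⟨(c, p.1), ⟨⟨p, hp, ⟨c, hc, rfl⟩⟩, by simp⟩, rfl⟩

-- the canonical ascending hit list for one week over the (name, codes) view
def hitListOf (cs : List (String × List String)) (s t : String) : List Int :=
  ((PySem.List.enumerate cs 0).filter (fun p => p.2.2.contains s || p.2.2.contains t)).map (·.1)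

lemma pairwise_hitListOf (cs : List (String × List String)) (s t : String) :
    (hitListOf cs s t).Pairwise (· < ·) := by
  unfold hitListOf
  exact List.pairwise_map.mpr ((PySem.List.pairwise_lt_enumerate cs 0).filter _)

lemma mem_hitListOf (cs : List (String × List String)) (s t : String) (x : Int) :
    x ∈ hitListOf cs s t ↔
      ∃ p ∈ PySem.List.enumerate cs 0, (s ∈ p.2.2 ∨ t ∈ p.2.2) ∧ x = p.1 := by
  unfold hitListOf
  simp only [List.mem_map, List.mem_filter, Bool.or_eq_true, List.contains_eq_mem,
    decide_eq_true_eq]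
  constructor
  · rintro ⟨p, ⟨hp, hc⟩, rfl⟩; exact ⟨p, hp, hc, rfl⟩
  · rintro ⟨p, hp, hc, rfl⟩; exact ⟨p, ⟨hp, hc⟩, rfl⟩

-- B's sorted set union IS the canonical ascending hit list.
lemma hits_eq (cs : List (String × List String)) (s t : String) :
    PySem.List.sorted
      (PySem.Set.ofList ((invertB (cs.map (·.2))).getD s [] ++ (invertB (cs.map (·.2))).getD t []))
      (fun x => x) false = hitListOf cs s t := by
  apply PySem.List.sorted_eq_of_perm_of_pairwise_lt
  · apply (List.perm_ext_iff_of_nodup ((pairwise_hitListOf cs s t).imp ne_of_lt)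
      (PySem.Set.nodup_ofList _)).mpr
    intro x
    rw [mem_hitListOf, PySem.Set.mem_ofList, List.mem_append, mem_invertB_getD, mem_invertB_getD]
    constructor
    · rintro ⟨p, hp, hc, rfl⟩
      obtain ⟨k, hk, rfl⟩ := (PySem.List.mem_enumerate_iff _ _ _).mp hp
      rcases hc with h | h
      · exact Or.inl ⟨((0 : Int) + k, (cs.map (·.2))[k]'(by simpa using hk)), by
          exact (PySem.List.mem_enumerate_iff _ _ _).mpr ⟨k, by simpa using hk, by simp⟩, by simpa using h, rfl⟩
      · exact Or.inr ⟨((0 : Int) + k, (cs.map (·.2))[k]'(by simpa using hk)), by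
          exact (PySem.List.mem_enumerate_iff _ _ _).mpr ⟨k, by simpa using hk, by simp⟩, by simpa using h, rfl⟩
    · rintro (⟨p, hp, hc, rfl⟩ | ⟨p, hp, hc, rfl⟩) <;>
        obtain ⟨k, hk, rfl⟩ := (PySem.List.mem_enumerate_iff _ _ _).mp hp
      · exact ⟨((0 : Int) + k, cs[k]'(by simpa using hk)), (PySem.List.mem_enumerate_iff _ _ _).mpr
          ⟨k, by simpa using hk, rfl⟩, Or.inl (by simpa using hc), rfl⟩
      · exact ⟨((0 : Int) + k, cs[k]'(by simpa using hk)), (PySem.List.mem_enumerate_iff _ _ _).mpr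
          ⟨k, by simpa using hk, rfl⟩, Or.inr (by simpa using hc), rfl⟩
  · exact pairwise_hitListOf cs s t

-- the hit list is empty exactly when no coupon matches
lemma hitListOf_eq_nil_iff (cs : List (String × List String)) (s t : String) :
    hitListOf cs s t = [] ↔ cs.any (fun c => c.2.contains s || c.2.contains t) = false := by
  unfold hitListOf
  rw [List.map_eq_nil_iff, List.filter_eq_nil_iff, List.any_eq_false]
  constructor
  · intro h c hc
    obtain ⟨k, hk, rfl⟩ : ∃ (k : Nat) (hk : k < cs.length), c = cs[k] := by
      obtain ⟨k, hk, rfl⟩ := List.mem_iff_getElem.mp hc; exact ⟨k, hk, rfl⟩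
    exact h ((0 : Int) + k, cs[k]) ((PySem.List.mem_enumerate_iff _ _ _).mpr ⟨k, hk, rfl⟩)
  · intro h p hp
    obtain ⟨k, hk, rfl⟩ := (PySem.List.mem_enumerate_iff _ _ _).mp hp
    exact h cs[k] (List.getElem_mem hk)

-- printing names by ascending index over the hit list = joining the filtered names
lemma outfold (s t : String) : ∀ (cs : List (String × List String)) (k : Int) (m : String),
    (∀ p ∈ PySem.List.enumerate cs k, PySem.List.pyGetD namesB p.1 "" = p.2.1) →
    (((PySem.List.enumerate cs k).filter
        (fun p => p.2.2.contains s || p.2.2.contains t)).map (·.1)).foldl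
      (fun acc i => acc ++ PySem.List.pyGetD namesB i "" ++ "\n") m
    = m ++ PySem.Str.join ""
        ((cs.filter (fun c => c.2.contains s || c.2.contains t)).map (fun c => c.1 ++ "\n")) := by
  intro cs
  induction cs with
  | nil => intro k m _; simp [PySem.List.enumerate_nil, join_empty]
  | cons c cs ih =>
    intro k m hname
    rw [PySem.List.enumerate_cons, List.filter_cons, List.filter_cons]
    rcases hc : (c.2.contains s || c.2.contains t) with _ | _
    · rw [if_neg (by simp), if_neg (by simp)]
      exact ih (k + 1) m (fun p hp => hname p (by simp [PySem.List.enumerate_cons, hp]))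
    · rw [if_pos rfl, if_pos rfl, List.map_cons, List.foldl_cons,
        hname (k, c) (by simp [PySem.List.enumerate_cons]),
        ih (k + 1) _ (fun p hp => hname p (by simp [PySem.List.enumerate_cons, hp])),
        List.map_cons, join_cons]
      simp [String.append_assoc]

-- one whole week of B equals one whole week of A (both already characterised)
lemma weekBA (cs : List (String × List String)) (s t : String)
    (hname : ∀ p ∈ PySem.List.enumerate cs (0 : Int), PySem.List.pyGetD namesB p.1 "" = p.2.1)
    (m : String) :
    (if (hitListOf cs s t).isEmpty then m ++ "你什麼也沒中\n"
     else (hitListOf cs s t).foldl (fun acc i => acc ++ PySem.List.pyGetD namesB i "" ++ "\n") m)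
    = (if cs.any (fun c => c.2.contains s || c.2.contains t) then
         m ++ PySem.Str.join ""
           ((cs.filter (fun c => c.2.contains s || c.2.contains t)).map (fun c => c.1 ++ "\n"))
       else m ++ "你什麼也沒中\n") := by
  rcases ha : cs.any (fun c => c.2.contains s || c.2.contains t) with _ | _
  · rw [if_pos (by rw [List.isEmpty_iff, hitListOf_eq_nil_iff]; exact ha), if_neg (by simp)]
  · rw [if_neg (by intro hIE; rw [List.isEmpty_iff, hitListOf_eq_nil_iff] at hIE; rw [hIE] at ha; exact absurd ha (by decide)), if_pos rfl]
    exact outfold s t cs 0 m hname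

lemma filter_nil_of_any_false {γ : Type} (p : γ → Bool) (l : List γ) (h : l.any p = false) :
    l.filter p = [] := by
  rw [List.filter_eq_nil_iff]
  intro x hx
  simpa using (List.any_eq_false.mp h) x hx

-- ===== VERDICT (by name: the statement is the Claim_ definition above) =====
set_option maxRecDepth 8192 in
theorem check_spec : Claim_equal_check := by
  intro id _
  unfold Spec_check
  by_cases h3 : PySem.Str.len id = 3
  case neg =>
    simp only [check, check_alt]
    rw [if_pos h3, if_pos h3]
  case pos =>
  obtain ⟨a, b, c, hl⟩ := List.length_eq_three.mp (hlen_three id h3)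
  have hsB : PySem.Str.slice id (some 1) none = String.ofList [b, c] := by
    apply str_toList_inj; simp [pysem, hl]
  have hsA : String.ofList [PySem.List.pyGetD id.toList 1 ' ', PySem.List.pyGetD id.toList 2 ' ']
      = String.ofList [b, c] := by rw [hl]; rfl
  -- the (name, codes) views of the two weeks
  have hv1 : week1B = (couponsA.map (fun x => (x.1, x.2.1))).map (·.2) := by decide
  have hv2 : week2B = (couponsA.map (fun x => (x.1, x.2.2))).map (·.2) := by decide
  have hn1 : ∀ p ∈ PySem.List.enumerate (couponsA.map (fun x => (x.1, x.2.1))) (0 : Int),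
      PySem.List.pyGetD namesB p.1 "" = p.2.1 := by decide
  have hn2 : ∀ p ∈ PySem.List.enumerate (couponsA.map (fun x => (x.1, x.2.2))) (0 : Int),
      PySem.List.pyGetD namesB p.1 "" = p.2.1 := by decide
  simp only [check, check_alt, idxB]
  rw [if_neg (not_not_intro h3), if_neg (not_not_intro h3)]
  rw [show PySem.List.pyRange 1 3 1 = [1, 2] from by decide]
  simp only [List.foldl_cons, List.foldl_nil]
  simp only [show ("week" : String) ++ PySem.Int.toStr 1 = "week1" from by decide,
             show ("week" : String) ++ PySem.Int.toStr 2 = "week2" from by decide,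
             getWeekA_w1, getWeekA_w2, hsA, hsB]
  rw [PySem.List.foldl_pyRange_zero_pyGetD couponsA ("", ([], []))
        (fun (p : String × Int) cpn =>
          if cpn.2.1.contains (String.ofList [b, c]) = true then (p.1 ++ cpn.1 ++ "\n", 1)
          else if cpn.2.1.contains id = true then (p.1 ++ cpn.1 ++ "\n", 1) else p)]
  rw [PySem.List.foldl_pyRange_zero_pyGetD couponsA ("", ([], []))
        (fun (p : String × Int) cpn =>
          if cpn.2.2.contains (String.ofList [b, c]) = true then (p.1 ++ cpn.1 ++ "\n", 1)
          else if cpn.2.2.contains id = true then (p.1 ++ cpn.1 ++ "\n", 1) else p)]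
  rw [weekA_eq (fun x => x.2.1) (fun x => x.1) (String.ofList [b, c]) id couponsA]
  rw [weekA_eq (fun x => x.2.2) (fun x => x.1) (String.ofList [b, c]) id couponsA]
  rw [hv1, hv2, hits_eq, hits_eq]
  rw [weekBA _ _ _ hn1, weekBA _ _ _ hn2]
  -- both sides are now the same case analysis over the two weeks' any-conditions
  have hf1 : (couponsA.map (fun x => (x.1, x.2.1))).filter
        (fun p => p.2.contains (String.ofList [b, c]) || p.2.contains id)
      = (couponsA.filter
          (fun x => x.2.1.contains (String.ofList [b, c]) || x.2.1.contains id)).map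
          (fun x => (x.1, x.2.1)) := by
    rw [List.filter_map]; rfl
  have hf2 : (couponsA.map (fun x => (x.1, x.2.2))).filter
        (fun p => p.2.contains (String.ofList [b, c]) || p.2.contains id)
      = (couponsA.filter
          (fun x => x.2.2.contains (String.ofList [b, c]) || x.2.2.contains id)).map
          (fun x => (x.1, x.2.2)) := by
    rw [List.filter_map]; rfl
  have ha1 : (couponsA.map (fun x => (x.1, x.2.1))).any
        (fun p => p.2.contains (String.ofList [b, c]) || p.2.contains id)
      = couponsA.any (fun x => x.2.1.contains (String.ofList [b, c]) || x.2.1.contains id) := by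
    rw [List.any_map]; rfl
  have ha2 : (couponsA.map (fun x => (x.1, x.2.2))).any
        (fun p => p.2.contains (String.ofList [b, c]) || p.2.contains id)
      = couponsA.any (fun x => x.2.2.contains (String.ofList [b, c]) || x.2.2.contains id) := by
    rw [List.any_map]; rfl
  rw [hf1, hf2, ha1, ha2, List.map_map, List.map_map]
  simp only [List.contains_eq_mem]
  rcases h1 : couponsA.any (fun x => decide (String.ofList [b, c] ∈ x.2.1) || decide (id ∈ x.2.1))
      with _ | _ <;>
  rcases h2 : couponsA.any (fun x => decide (String.ofList [b, c] ∈ x.2.2) || decide (id ∈ x.2.2))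
      with _ | _
  · rw [filter_nil_of_any_false _ _ h1, filter_nil_of_any_false _ _ h2]
    simp [join_empty, String.append_assoc]
  · rw [filter_nil_of_any_false _ _ h1]
    simp [join_empty, String.append_assoc]
    rfl
  · rw [filter_nil_of_any_false _ _ h2]
    simp [join_empty, String.append_assoc]
    rfl
  · simp [String.append_assoc]
    rfl
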